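-- pv_equiv track=rewrite | github.com/phoenixlink-cloud/orion-agent | src/orion/core/editing/validator.py | _check_indentation
-- ===== SOURCE A (Python) =====
-- def _check_indentation(content: str) -> tuple[bool, str]:
--     lines = content.split("\n")
--     has_tabs = False
--     has_spaces = False
--
--     for line in lines:
--         if not line.strip():
--             continue
--         leading = line[: len(line) - len(line.lstrip())]
--         if "\t" in leading:
--             has_tabs = True
--         if " " in leading and leading.strip() == "":
--             has_spaces = True
--
--     if has_tabs and has_spaces:
--         return False, "Mixed tabs and spaces"
--     return True, ""
-- ===== SOURCE B (Python) =====
-- def _check_indentation(content: str) -> tuple[bool, str]: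
--     # Character-level scan: no split/lstrip/slicing.  While at the indentation
--     # of a line we remember which indent characters were seen (pending); they
--     # are committed only when the line proves non-blank (first non-space char).
--     has_tabs = False
--     has_spaces = False
--     pend_tab = False
--     pend_space = False
--     at_indent = True
--     for ch in content:
--         if ch == "\n":
--             pend_tab = False
--             pend_space = False
--             at_indent = True
--         elif at_indent:
--             if ch.isspace():
--                 pend_tab = pend_tab or ch == "\t"
--                 pend_space = pend_space or ch == " "
--             else:
--                 has_tabs = has_tabs or pend_tab
--                 has_spaces = has_spaces or pend_space
--                 at_indent = False
--     if has_tabs and has_spaces: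
--         return False, "Mixed tabs and spaces"
--     return True, ""
-- ===== Notes on version B (the rewrite author's own statement) =====
-- stated objective: alternative
-- what changed: Replaces A's split-into-lines pass with per-line lstrip/slicing and two flags by a single character-level state machine over the raw string that tracks pending indent characters and commits them only when a line proves non-blank.
import Mathlib
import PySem

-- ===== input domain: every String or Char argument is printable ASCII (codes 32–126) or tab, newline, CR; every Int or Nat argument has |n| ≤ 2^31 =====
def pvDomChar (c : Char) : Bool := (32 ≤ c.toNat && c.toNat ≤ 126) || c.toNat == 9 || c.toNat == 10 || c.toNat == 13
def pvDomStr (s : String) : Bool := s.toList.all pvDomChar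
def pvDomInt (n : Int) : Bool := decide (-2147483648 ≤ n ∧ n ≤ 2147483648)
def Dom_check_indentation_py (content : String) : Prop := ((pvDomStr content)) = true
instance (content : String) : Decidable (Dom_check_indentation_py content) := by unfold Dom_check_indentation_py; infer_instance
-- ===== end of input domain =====

-- B replaces A's line-splitting/lstrip/slicing pass with a single character-level
-- state machine over the raw string (pending indent chars committed when a line
-- proves non-blank); objective: alternative decomposition, same O(n) cost.


-- ===== PORT A =====
def check_indentation_py (content : String) : Bool × String :=
  let lines := (PySem.Str.split? content "\n").getD []
  let st := lines.foldl (fun (st : Bool × Bool) line =>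
    if PySem.Str.strip line == "" then st
    else
      let leading := PySem.Str.slice line none
        (some (PySem.Str.len line - PySem.Str.len (PySem.Str.lstrip line)))
      let ht := if PySem.Str.isIn "\t" leading then true else st.1
      let hs := if PySem.Str.isIn " " leading && (PySem.Str.strip leading == "") then true else st.2
      (ht, hs)) (false, false)
  if st.1 && st.2 then (false, "Mixed tabs and spaces") else (true, "")

-- ===== PORT B =====
-- state = (has_tabs, has_spaces, pend_tab, pend_space, at_indent), exactly Source B's five flags
def pvStepB (st : Bool × Bool × Bool × Bool × Bool) (ch : Char) : Bool × Bool × Bool × Bool × Bool :=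
  match st with
  | (ht, hs, pt, ps, ai) =>
    if ch = '\n' then (ht, hs, false, false, true)
    else if ai then
      if PySem.Chars.isspace ch then (ht, hs, pt || decide (ch = '\t'), ps || decide (ch = ' '), ai)
      else (ht || pt, hs || ps, pt, ps, false)
    else st

def check_indentation_py_alt (content : String) : Bool × String :=
  let st := content.toList.foldl pvStepB (false, false, false, false, true)
  if st.1 && st.2.1 then (false, "Mixed tabs and spaces") else (true, "")

-- ===== PRECONDITION & SPEC =====
def Spec_check_indentation_py (content : String) (out : Bool × String) : Prop := out = check_indentation_py_alt content
instance (content : String) (out : Bool × String) : Decidable (Spec_check_indentation_py content out) := by unfold Spec_check_indentation_py; infer_instance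

-- ===== CLAIM (what is proved, stated in full; the proofs are below) =====
def Claim_equal_check_indentation_py : Prop := ∀ (content : String), Dom_check_indentation_py content → Spec_check_indentation_py content (check_indentation_py content)

-- ===== LEMMAS AND PROOFS =====

-- simple recursive split on '\n' (proof-side model of PySem.Chars.splitOn · ['\n'])
def pvSplitNL : List Char → List (List Char)
  | [] => [[]]
  | c :: rest =>
    if c = '\n' then [] :: pvSplitNL rest
    else match pvSplitNL rest with
      | [] => [[c]]
      | p :: ps => (c :: p) :: ps

def pvConsHead (pre : List Char) : List (List Char) → List (List Char)
  | [] => [pre]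
  | p :: ps => (pre ++ p) :: ps

def pvJoinNL : List (List Char) → List Char
  | [] => []
  | [l] => l
  | l :: ls => l ++ '\n' :: pvJoinNL ls

theorem pv_splitNL_ne_nil (cs : List Char) : pvSplitNL cs ≠ [] := by
  cases cs with
  | nil => simp [pvSplitNL]
  | cons c rest =>
    by_cases hc : c = '\n'
    · simp [pvSplitNL, hc]
    · cases h : pvSplitNL rest <;> simp [pvSplitNL, hc, h]

theorem pv_go_eq (fuel : Nat) (l cur : List Char) (acc : List (List Char)) (h : l.length < fuel) :
    PySem.Chars.splitOn.go ['\n'] fuel l cur acc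
      = acc.reverse ++ pvConsHead cur.reverse (pvSplitNL l) := by
  induction fuel generalizing l cur acc with
  | zero => omega
  | succ fuel ih =>
    cases l with
    | nil => simp [PySem.Chars.splitOn.go, pvSplitNL, pvConsHead]
    | cons c rest =>
      by_cases hc : c = '\n'
      · subst hc
        rw [show PySem.Chars.splitOn.go ['\n'] (fuel+1) ('\n' :: rest) cur acc
            = PySem.Chars.splitOn.go ['\n'] fuel rest [] (cur.reverse :: acc) by
          simp [PySem.Chars.splitOn.go, List.isPrefixOf]]
        rw [ih rest [] (cur.reverse :: acc) (by simpa using Nat.lt_of_succ_lt_succ h)]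
        cases hsp : pvSplitNL rest with
        | nil => exact absurd hsp (pv_splitNL_ne_nil rest)
        | cons p ps => simp [pvSplitNL, hsp, pvConsHead]
      · have hpre : (['\n'].isPrefixOf (c :: rest)) = false := by
          simp [List.isPrefixOf]
          exact fun h => absurd h.symm hc
        rw [show PySem.Chars.splitOn.go ['\n'] (fuel+1) (c :: rest) cur acc
            = PySem.Chars.splitOn.go ['\n'] fuel rest (c :: cur) acc by
          simp [PySem.Chars.splitOn.go, hpre]]
        rw [ih rest (c :: cur) acc (by simpa using Nat.lt_of_succ_lt_succ h)]
        cases hsp : pvSplitNL rest with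
        | nil => exact absurd hsp (pv_splitNL_ne_nil rest)
        | cons p ps => simp [pvSplitNL, hc, hsp, pvConsHead]

theorem pv_splitOn_eq (cs : List Char) : PySem.Chars.splitOn cs ['\n'] = pvSplitNL cs := by
  rw [PySem.Chars.splitOn, pv_go_eq (cs.length + 1) cs [] [] (by omega)]
  cases h : pvSplitNL cs with
  | nil => exact absurd h (pv_splitNL_ne_nil cs)
  | cons p ps => simp [pvConsHead]

theorem pv_join_split (cs : List Char) : pvJoinNL (pvSplitNL cs) = cs := by
  induction cs with
  | nil => simp [pvSplitNL, pvJoinNL]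
  | cons c rest ih =>
    by_cases hc : c = '\n'
    · subst hc
      rw [show pvSplitNL ('\n' :: rest) = [] :: pvSplitNL rest by simp [pvSplitNL]]
      cases h : pvSplitNL rest with
      | nil => exact absurd h (pv_splitNL_ne_nil rest)
      | cons p ps =>
        rw [h] at ih
        simp [pvJoinNL, ← ih]
    · cases h : pvSplitNL rest with
      | nil => exact absurd h (pv_splitNL_ne_nil rest)
      | cons p ps =>
        rw [show pvSplitNL (c :: rest) = (c :: p) :: ps by simp [pvSplitNL, hc, h]]
        rw [h] at ih
        cases ps with
        | nil => simpa [pvJoinNL] using ih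
        | cons q qs => simpa [pvJoinNL] using ih

theorem pv_splitNL_no_nl (cs : List Char) (p : List Char) (hp : p ∈ pvSplitNL cs) : '\n' ∉ p := by
  induction cs generalizing p with
  | nil => simp [pvSplitNL] at hp; simp [hp]
  | cons c rest ih =>
    by_cases hc : c = '\n'
    · rw [show pvSplitNL (c :: rest) = [] :: pvSplitNL rest by simp [pvSplitNL, hc]] at hp
      rcases List.mem_cons.1 hp with h | h
      · simp [h]
      · exact ih p h
    · cases h : pvSplitNL rest with
      | nil => exact absurd h (pv_splitNL_ne_nil rest)
      | cons q qs =>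
        rw [show pvSplitNL (c :: rest) = (c :: q) :: qs by simp [pvSplitNL, hc, h]] at hp
        rcases List.mem_cons.1 hp with h2 | h2
        · subst h2
          intro hmem
          rcases List.mem_cons.1 hmem with h3 | h3
          · exact hc h3.symm
          · exact ih q (by simp [h]) h3
        · exact ih p (by simp [h, h2])

-- the per-line update A effectively performs, phrased over List Char
def pvLineUpd (st : Bool × Bool) (l : List Char) : Bool × Bool :=
  if l.all PySem.Chars.isspace then st
  else (st.1 || decide ('\t' ∈ l.takeWhile PySem.Chars.isspace),
        st.2 || decide (' ' ∈ l.takeWhile PySem.Chars.isspace))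

theorem pv_frozen (l : List Char) (hnl : '\n' ∉ l) (ht hs pt ps : Bool) :
    l.foldl pvStepB (ht, hs, pt, ps, false) = (ht, hs, pt, ps, false) := by
  induction l with
  | nil => rfl
  | cons c rest ih =>
    have hc : ¬ c = '\n' := fun h => hnl (by simp [h])
    rw [List.foldl_cons, show pvStepB (ht, hs, pt, ps, false) c = (ht, hs, pt, ps, false) by
      simp [pvStepB, hc]]
    exact ih (fun h => hnl (List.mem_cons_of_mem _ h))

theorem pv_lead (l : List Char) (hnl : '\n' ∉ l) (ht hs pt ps : Bool) :
    l.foldl pvStepB (ht, hs, pt, ps, true)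
      = (if l.all PySem.Chars.isspace then
          (ht, hs, pt || decide ('\t' ∈ l.takeWhile PySem.Chars.isspace),
           ps || decide (' ' ∈ l.takeWhile PySem.Chars.isspace), true)
        else
          (ht || pt || decide ('\t' ∈ l.takeWhile PySem.Chars.isspace),
           hs || ps || decide (' ' ∈ l.takeWhile PySem.Chars.isspace),
           pt || decide ('\t' ∈ l.takeWhile PySem.Chars.isspace),
           ps || decide (' ' ∈ l.takeWhile PySem.Chars.isspace), false)) := by
  induction l generalizing ht hs pt ps with
  | nil => simp
  | cons c rest ih =>
    have hc : ¬ c = '\n' := fun h => hnl (by simp [h])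
    have hrest : '\n' ∉ rest := fun h => hnl (List.mem_cons_of_mem _ h)
    by_cases hsp : PySem.Chars.isspace c
    · rw [List.foldl_cons, show pvStepB (ht, hs, pt, ps, true) c
          = (ht, hs, pt || decide (c = '\t'), ps || decide (c = ' '), true) by
        simp [pvStepB, hc, hsp]]
      rw [ih hrest]
      have hct : decide (c = '\t') = decide ('\t' = c) := by simp [eq_comm]
      have hcs : decide (c = ' ') = decide (' ' = c) := by simp [eq_comm]
      simp [hsp, Bool.or_assoc, hct, hcs]
    · rw [List.foldl_cons, show pvStepB (ht, hs, pt, ps, true) c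
          = (ht || pt, hs || ps, pt, ps, false) by simp [pvStepB, hc, hsp]]
      rw [pv_frozen rest hrest]
      simp [hsp, Bool.or_comm]

theorem pv_comp (lines : List (List Char)) (h : ∀ p ∈ lines, '\n' ∉ p) (ht hs : Bool) :
    (((pvJoinNL lines).foldl pvStepB (ht, hs, false, false, true)).1,
     ((pvJoinNL lines).foldl pvStepB (ht, hs, false, false, true)).2.1)
      = lines.foldl pvLineUpd (ht, hs) := by
  induction lines generalizing ht hs with
  | nil => simp [pvJoinNL]
  | cons l ls ih =>
    have hl : '\n' ∉ l := h l (by simp)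
    cases ls with
    | nil =>
      rw [show pvJoinNL [l] = l from rfl, pv_lead l hl]
      by_cases hall : l.all PySem.Chars.isspace <;>
        simp [hall, pvLineUpd]
    | cons l2 rest =>
      rw [show pvJoinNL (l :: l2 :: rest) = l ++ '\n' :: pvJoinNL (l2 :: rest) from rfl,
        List.foldl_append, pv_lead l hl, List.foldl_cons]
      have hstep : ∀ (a b c d e : Bool), pvStepB (a, b, c, d, e) '\n' = (a, b, false, false, true) := by
        intro a b c d e; simp [pvStepB]
      by_cases hall : l.all PySem.Chars.isspace
      · rw [if_pos hall, hstep, ih (fun p hp => h p (by simp [hp]))]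
        simp [pvLineUpd, hall]
      · rw [if_neg hall, hstep, ih (fun p hp => h p (by simp [hp]))]
        simp [pvLineUpd, hall]

theorem pv_singleton_infix_iff {c : Char} {cs : List Char} : [c] <:+: cs ↔ c ∈ cs := by
  constructor
  · rintro ⟨p, s, rfl⟩; simp
  · intro h
    obtain ⟨p, s, rfl⟩ := List.append_of_mem h
    exact ⟨p, s, by simp⟩

theorem pv_leading_toList (line : String) :
    (PySem.Str.slice line none
        (some (PySem.Str.len line - PySem.Str.len (PySem.Str.lstrip line)))).toList
      = line.toList.takeWhile PySem.Chars.isspace := by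
  rw [PySem.Str.toList_slice]
  have hlen : (line.toList.takeWhile PySem.Chars.isspace).length
      + (line.toList.dropWhile PySem.Chars.isspace).length = line.toList.length := by
    rw [← List.length_append, List.takeWhile_append_dropWhile]
  have hL : line.toList.length = line.length := by simp
  have hb : PySem.Str.len line - PySem.Str.len (PySem.Str.lstrip line)
      = ((line.toList.takeWhile PySem.Chars.isspace).length : Int) := by
    simp [PySem.Str.len, PySem.Str.toList_lstrip, PySem.Chars.lstrip]
    omega
  rw [hb, PySem.Chars.slice_eq_listSlice, PySem.List.slice_to_natCast]
  exact ((List.prefix_iff_eq_take).1 (List.takeWhile_prefix _)).symm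

theorem pv_strip_leading (line : String) :
    PySem.Chars.strip (line.toList.takeWhile PySem.Chars.isspace) = [] := by
  have h : List.dropWhile PySem.Chars.isspace (List.takeWhile PySem.Chars.isspace line.toList) = [] := by
    rw [List.dropWhile_eq_nil_iff]
    intro x hx
    exact List.mem_takeWhile_imp hx
  simp [PySem.Chars.strip, PySem.Chars.lstrip, PySem.Chars.rstrip, h]

theorem pv_isIn_eq (sub : String) (c : Char) (hc : sub.toList = [c]) (s : String) :
    PySem.Str.isIn sub s = decide (c ∈ s.toList) := by
  simp only [PySem.Str.isIn, hc]
  rw [Bool.eq_iff_iff]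
  simp [PySem.Chars.isIn_iff_infix, pv_singleton_infix_iff]

theorem pv_strip_slice_eq_nil (line : String) :
    PySem.Str.strip (PySem.Str.slice line none
      (some (PySem.Str.len line - PySem.Str.len (PySem.Str.lstrip line)))) = "" := by
  rw [← String.toList_inj, PySem.Str.toList_strip, pv_leading_toList]
  exact pv_strip_leading line

theorem pv_strip_nil_iff (p : List Char) :
    (PySem.Chars.strip p = []) ↔ (p.all PySem.Chars.isspace = true) := by
  constructor
  · intro h
    rw [List.all_eq_true]
    intro c hc
    have hsplit : p = p.takeWhile PySem.Chars.isspace ++ p.dropWhile PySem.Chars.isspace :=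
      (List.takeWhile_append_dropWhile).symm
    rw [hsplit] at hc
    rcases List.mem_append.1 hc with h1 | h1
    · exact List.mem_takeWhile_imp h1
    · have h' := h
      simp [PySem.Chars.strip, PySem.Chars.lstrip, PySem.Chars.rstrip,
        List.dropWhile_eq_nil_iff] at h'
      exact h' c h1
  · intro h
    have h1 : List.dropWhile PySem.Chars.isspace p = [] := by
      rw [List.dropWhile_eq_nil_iff]
      intro c hc
      exact List.all_eq_true.1 h c hc
    simp [PySem.Chars.strip, PySem.Chars.lstrip, PySem.Chars.rstrip, h1]

-- A's per-line body equals pvLineUpd on the underlying char list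
theorem pv_line_eq (st : Bool × Bool) (p : List Char) :
    (fun (st : Bool × Bool) line =>
      if PySem.Str.strip line == "" then st
      else
        let leading := PySem.Str.slice line none
          (some (PySem.Str.len line - PySem.Str.len (PySem.Str.lstrip line)))
        let ht := if PySem.Str.isIn "\t" leading then true else st.1
        let hs := if PySem.Str.isIn " " leading && (PySem.Str.strip leading == "") then true else st.2
        (ht, hs)) st (String.ofList p)
      = pvLineUpd st p := by
  have htl : (String.ofList p).toList = p := by simp
  have hcond : (PySem.Str.strip (String.ofList p) == "") = p.all PySem.Chars.isspace := by
    rw [Bool.eq_iff_iff, beq_iff_eq, ← String.toList_inj, PySem.Str.toList_strip, htl]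
    simpa using pv_strip_nil_iff p
  simp only [pvLineUpd, hcond]
  by_cases hall : p.all PySem.Chars.isspace
  · simp [hall]
  · simp only [pv_isIn_eq "\t" '\t' rfl, pv_isIn_eq " " ' ' rfl, pv_strip_slice_eq_nil,
      pv_leading_toList, htl]
    simp [hall, Bool.or_comm]

-- ===== VERDICT (by name: the statement is the Claim_ definition above) =====
theorem check_indentation_py_spec : Claim_equal_check_indentation_py := by
  intro content _
  unfold Spec_check_indentation_py check_indentation_py check_indentation_py_alt
  have hlines : (PySem.Str.split? content "\n").getD []
      = (pvSplitNL content.toList).map String.ofList := by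
    simp [PySem.Str.split?, PySem.Chars.split?, pv_splitOn_eq]
  dsimp only
  rw [hlines, List.foldl_map]
  have hA : (pvSplitNL content.toList).foldl
      (fun st p => (fun (st : Bool × Bool) line =>
        if PySem.Str.strip line == "" then st
        else
          let leading := PySem.Str.slice line none
            (some (PySem.Str.len line - PySem.Str.len (PySem.Str.lstrip line)))
          let ht := if PySem.Str.isIn "\t" leading then true else st.1
          let hs := if PySem.Str.isIn " " leading && (PySem.Str.strip leading == "") then true else st.2
          (ht, hs)) st (String.ofList p)) (false, false)
      = (pvSplitNL content.toList).foldl pvLineUpd (false, false) := by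
    congr 1
    funext st p
    exact pv_line_eq st p
  rw [hA]
  have hB := pv_comp (pvSplitNL content.toList) (pv_splitNL_no_nl content.toList) false false
  rw [pv_join_split] at hB
  rw [← hB]
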